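-- pv_equiv track=rewrite | github.com/Xuan045/twb_data_cleaning | twb_ancestry/process_origin.py | combine_native_info
-- ===== SOURCE A (Python) =====
-- def combine_native_info(mom_native, fa_native):
--     priority_order = ['Holo', 'Hakka', 'Aborigine', 'Southern China', 'Southern China/Northern China', 'Southern China/Other China',
--                       'Northern China', 'Northern China/Other China', 'Other China', 'Other']
--     if mom_native == fa_native:
--         return mom_native
--     else:
--         ancestries = [ancestry for ancestry in [mom_native, fa_native] if ancestry]
--         # Split combined ancestries into individual components, flatten the list
--         ancestries_flat = [sub_ancestry for ancestry in ancestries for sub_ancestry in ancestry.split('/')]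
--         # Remove duplicates and sort by priority order
--         ancestries_unique = sorted(set(ancestries_flat), key=lambda x: priority_order.index(x))
--         # Join the unique, sorted ancestries
--         return '/'.join(ancestries_unique)
-- ===== SOURCE B (Python) =====
-- def combine_native_info(mom_native, fa_native):
--     priority_order = ['Holo', 'Hakka', 'Aborigine', 'Southern China', 'Southern China/Northern China', 'Southern China/Other China',
--                       'Northern China', 'Northern China/Other China', 'Other China', 'Other']
--     if mom_native == fa_native:
--         return mom_native
--     rank = {label: i for i, label in enumerate(priority_order)}
--     present = {rank[sub] for ancestry in (mom_native, fa_native) if ancestry for sub in ancestry.split('/')}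
--     return '/'.join(label for i, label in enumerate(priority_order) if i in present)
-- ===== Notes on version B (the rewrite author's own statement) =====
-- stated objective: alternative
-- what changed: Instead of sorting the set of sub-ancestry strings with sorted(..., key=priority_order.index) (a list scan per comparison key), B maps each sub-ancestry to its rank via a dict, collects the set of ranks present, and emits the labels in one enumerate pass over priority_order, so no sort and no .index scans are needed; Pre_ excludes the (None, None) input where A returns None (not a str) and inputs with a sub-ancestry missing from priority_order, where both programs raise (A a ValueError from .index, B a KeyError from the rank dict).
-- outside the precondition, e.g. on combine_native_info(None, None): A returns None, B returns None; on combine_native_info('Holo', 'Klingon'): A raises ValueError, B raises KeyError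
import Mathlib
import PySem

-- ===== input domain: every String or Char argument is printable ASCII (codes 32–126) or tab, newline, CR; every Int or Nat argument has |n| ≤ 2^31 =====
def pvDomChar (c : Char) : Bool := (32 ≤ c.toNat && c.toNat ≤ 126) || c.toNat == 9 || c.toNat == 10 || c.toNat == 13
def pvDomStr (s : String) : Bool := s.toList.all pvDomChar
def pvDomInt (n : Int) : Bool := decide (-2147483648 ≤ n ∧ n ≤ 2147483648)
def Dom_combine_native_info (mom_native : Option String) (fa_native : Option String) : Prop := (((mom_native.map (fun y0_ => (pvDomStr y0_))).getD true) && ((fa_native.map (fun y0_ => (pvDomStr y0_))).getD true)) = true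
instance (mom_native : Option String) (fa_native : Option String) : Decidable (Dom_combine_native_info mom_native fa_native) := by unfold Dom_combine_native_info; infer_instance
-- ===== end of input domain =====

-- B replaces A's sorted(set(...), key=priority_order.index) by a rank dict, a set of the
-- ranks present, and one enumerate pass over priority_order (objective: alternative).
-- The shared priority list.
def pvPriority : List String := ["Holo", "Hakka", "Aborigine", "Southern China", "Southern China/Northern China", "Southern China/Other China",
                                 "Northern China", "Northern China/Other China", "Other China", "Other"]

-- ===== PORT A =====
def combine_native_info (mom_native : Option String) (fa_native : Option String) : String :=
  if mom_native = fa_native then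
    mom_native.getD ""   -- mom_native is some _ on Pre_ (a None return is not a String and is excluded)
  else
    -- ancestries = [a for a in [mom_native, fa_native] if a]  (None and "" are falsy)
    let ancestries : List String := ([mom_native, fa_native].filterMap id).filter (fun a => a ≠ "")
    -- ancestries_flat: split each on '/' and flatten ("/" ≠ "", so split? is always some)
    let ancestries_flat : List String := ancestries.flatMap (fun a => (PySem.Str.split? a "/").getD [])
    -- sorted(set(ancestries_flat), key=priority_order.index); on Pre_ every label is in
    -- pvPriority, so index? is some (Python's ValueError is excluded by Pre_)
    let ancestries_unique : List String :=
      PySem.List.sorted (PySem.Set.ofList ancestries_flat)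
        (fun x => (PySem.List.index? pvPriority x).getD 0)
    PySem.Str.join "/" ancestries_unique

-- ===== PORT B =====
def combine_native_info_alt (mom_native : Option String) (fa_native : Option String) : String :=
  if mom_native = fa_native then
    mom_native.getD ""   -- None excluded by Pre_
  else
    -- rank = {label: i for i, label in enumerate(priority_order)}
    let rank : PySem.Dict String Int :=
      (PySem.List.enumerate pvPriority).foldl (fun d p => d.insert p.2 p.1) PySem.Dict.empty
    -- present = {rank[sub] for ancestry in (mom_native, fa_native) if ancestry for sub in ancestry.split('/')}
    -- rank[sub] raises KeyError for a sub-ancestry outside priority_order; those inputs are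
    -- excluded by Pre_, so getD's default is never the value used
    let present : PySem.Set Int :=
      PySem.Set.ofList
        ((([mom_native, fa_native].filterMap id).filter (fun a => a ≠ "")).flatMap
          (fun a => ((PySem.Str.split? a "/").getD []).map (fun sub => rank.getD sub 0)))
    -- '/'.join(label for i, label in enumerate(priority_order) if i in present)
    PySem.Str.join "/"
      (((PySem.List.enumerate pvPriority).filter (fun p => present.contains p.1)).map (fun p => p.2))

-- ===== PRECONDITION & SPEC =====
-- The sub-ancestries of the input (for stating Pre_ only).
def pvSubs (mom_native : Option String) (fa_native : Option String) : List String :=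
  (([mom_native, fa_native].filterMap id).filter (fun a => a ≠ "")).flatMap
    (fun a => (PySem.Str.split? a "/").getD [])

-- Pre_ excludes (i) equal inputs that are both None, where A returns None — not a str —
-- and (ii) unequal inputs containing a sub-ancestry missing from priority_order, where
-- A raises ValueError (from .index) and B raises KeyError (from the rank dict).
def Pre_combine_native_info (mom_native : Option String) (fa_native : Option String) : Prop :=
  (mom_native = fa_native → mom_native ≠ none) ∧
  (mom_native ≠ fa_native → ∀ x ∈ pvSubs mom_native fa_native, x ∈ pvPriority)
instance (mom_native : Option String) (fa_native : Option String) : Decidable (Pre_combine_native_info mom_native fa_native) := by unfold Pre_combine_native_info; infer_instance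

def pvWitness_combine_native_info : Option String × Option String := (some "Holo", some "Other China/Hakka")

def Spec_combine_native_info (mom_native : Option String) (fa_native : Option String) (out : String) : Prop := out = combine_native_info_alt mom_native fa_native
instance (mom_native : Option String) (fa_native : Option String) (out : String) : Decidable (Spec_combine_native_info mom_native fa_native out) := by unfold Spec_combine_native_info; infer_instance

-- ===== CLAIM (what is proved, stated in full; the proofs are below) =====
def Claim_equal_combine_native_info : Prop := ∀ (mom_native : Option String) (fa_native : Option String), Dom_combine_native_info mom_native fa_native → Pre_combine_native_info mom_native fa_native → Spec_combine_native_info mom_native fa_native (combine_native_info mom_native fa_native)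

-- ===== LEMMAS AND PROOFS =====

-- B's rank dict as a closed term, and the rank of one label.
def pvRank : PySem.Dict String Int :=
  (PySem.List.enumerate pvPriority).foldl (fun d p => d.insert p.2 p.1) PySem.Dict.empty
def pvRk (s : String) : Int := pvRank.getD s 0

-- pvRk agrees with enumerate's index on pvPriority, and is injective on pvPriority.
theorem pvRk_enum : ∀ p ∈ PySem.List.enumerate pvPriority, pvRk p.2 = p.1 := by decide
theorem pvRk_inj : ∀ x ∈ pvPriority, ∀ y ∈ pvPriority, pvRk x = pvRk y → x = y := by decide

theorem pvSubsB_eq (m f : Option String) :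
    ((([m, f].filterMap id).filter (fun a => a ≠ "")).flatMap
        (fun a => ((PySem.Str.split? a "/").getD []).map (fun sub => pvRank.getD sub 0)))
      = (pvSubs m f).map pvRk := by
  simp only [pvSubs, List.map_flatMap]
  rfl

-- generator '(p.2 for p in enumerate(xs) if q(p))': when q only looks at the index-paired
-- element through its second component, it is a plain filter of xs.
theorem pvEnumFilterMap (xs : List String) (s : Int) (q : String → Bool) :
    ((PySem.List.enumerate xs s).filter (fun p => q p.2)).map (fun p => p.2) = xs.filter q := by
  induction xs generalizing s with
  | nil => rfl
  | cons x xs ih =>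
      rw [PySem.List.enumerate_cons]
      by_cases h : q x <;> simp [List.filter, h, ih]

-- pvPriority is strictly increasing under the .index key, and has no duplicates.
theorem pvPriority_pairwise :
    pvPriority.Pairwise
      (fun a b => (PySem.List.index? pvPriority a).getD 0 < (PySem.List.index? pvPriority b).getD 0) := by
  decide

-- Core for A: sorting a nodup sub-list of pvPriority by .index is filtering pvPriority by membership.
theorem pvSorted_eq_filter (s : List String) (hn : s.Nodup) (hsub : ∀ x ∈ s, x ∈ pvPriority) :
    PySem.List.sorted s (fun x => (PySem.List.index? pvPriority x).getD 0)
      = pvPriority.filter (fun p => decide (p ∈ s)) := by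
  apply PySem.List.sorted_eq_of_perm_of_pairwise_lt
  · rw [List.perm_ext_iff_of_nodup (List.Nodup.filter _ (by decide)) hn]
    intro a
    simp only [List.mem_filter, decide_eq_true_eq]
    exact ⟨fun h => h.2, fun h => ⟨hsub a h, h⟩⟩
  · exact List.Pairwise.filter _ pvPriority_pairwise

-- Core for B: the rank-set filter of enumerate(pvPriority) selects exactly the labels in subs.
theorem pvRankFilter_eq (subs : List String) (hsub : ∀ x ∈ subs, x ∈ pvPriority) :
    ((PySem.List.enumerate pvPriority).filter
        (fun p => (PySem.Set.ofList (subs.map pvRk)).contains p.1)).map (fun p => p.2)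
      = pvPriority.filter (fun p => decide (p ∈ PySem.Set.ofList subs)) := by
  have hcongr : (PySem.List.enumerate pvPriority).filter
        (fun p => (PySem.Set.ofList (subs.map pvRk)).contains p.1)
      = (PySem.List.enumerate pvPriority).filter
        (fun p => (PySem.Set.ofList (subs.map pvRk)).contains (pvRk p.2)) :=
    List.filter_congr (fun p hp => by rw [pvRk_enum p hp])
  rw [hcongr, pvEnumFilterMap pvPriority 0 (fun l => (PySem.Set.ofList (subs.map pvRk)).contains (pvRk l))]
  apply List.filter_congr
  intro l hl
  have h1 : (PySem.Set.ofList (subs.map pvRk)).contains (pvRk l) = true ↔ l ∈ subs := by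
    rw [PySem.Set.contains_iff, PySem.Set.mem_ofList]
    constructor
    · intro h
      rcases List.mem_map.mp h with ⟨x, hx, hxe⟩
      exact pvRk_inj x (hsub x hx) l hl hxe ▸ hx
    · intro h
      exact List.mem_map.mpr ⟨l, h, rfl⟩
  have h2 : decide (l ∈ PySem.Set.ofList subs) = true ↔ l ∈ subs := by
    simp [PySem.Set.mem_ofList]
  by_cases h : l ∈ subs
  · rw [h1.mpr h, h2.mpr h]
  · rw [Bool.eq_false_iff.mpr (fun hc => h (h1.mp hc)),
        Bool.eq_false_iff.mpr (fun hc => h (h2.mp hc))]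

theorem combine_native_info_eq (m f : Option String)
    (hpre : Pre_combine_native_info m f) :
    combine_native_info m f = combine_native_info_alt m f := by
  by_cases hmf : m = f
  · simp [combine_native_info, combine_native_info_alt, hmf]
  · obtain ⟨-, hmem⟩ := hpre
    have hmem' := hmem hmf
    simp only [combine_native_info, combine_native_info_alt, if_neg hmf]
    congr 1
    have hflat : (([m, f].filterMap id).filter (fun a => a ≠ "")).flatMap
        (fun a => (PySem.Str.split? a "/").getD []) = pvSubs m f := rfl
    rw [hflat, show ((PySem.List.enumerate pvPriority).foldl (fun d p => d.insert p.2 p.1)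
          PySem.Dict.empty) = pvRank from rfl,
        pvSubsB_eq m f,
        pvRankFilter_eq (pvSubs m f) hmem',
        pvSorted_eq_filter (PySem.Set.ofList (pvSubs m f)) (PySem.Set.nodup_ofList _)
          (fun x hx => hmem' x ((PySem.Set.mem_ofList _ _).mp hx))]

-- ===== VERDICT (by name: the statement is the Claim_ definition above) =====
theorem combine_native_info_spec : Claim_equal_combine_native_info := by
  intro m f _ hpre
  unfold Spec_combine_native_info
  exact combine_native_info_eq m f hpre
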